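-- pv_equiv track=rewrite | github.com/Ljove02/AIT-AiTranscribe-MacOS | backend/batch_transcriber.py | deduplicate_overlap
-- ===== SOURCE A (Python) =====
-- OVERLAP_DEDUP_WORDS = 20
--
-- def deduplicate_overlap(prev_text: str, curr_text: str, n_words: int = OVERLAP_DEDUP_WORDS) -> str:
--     """
--     Remove duplicate text at the boundary between two consecutive chunks.
--
--     Takes the last n_words from prev_text and first n_words from curr_text,
--     finds the longest common subsequence of words, and removes the overlap
--     from the beginning of curr_text.
--     """
--     if not prev_text or not curr_text:
--         return curr_text
--
--     prev_words = prev_text.split()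
--     curr_words = curr_text.split()
--
--     if not prev_words or not curr_words:
--         return curr_text
--
--     # Take the tail of prev and head of curr for comparison
--     prev_tail = prev_words[-n_words:] if len(prev_words) >= n_words else prev_words
--     curr_head = curr_words[:n_words] if len(curr_words) >= n_words else curr_words
--
--     # Find the longest matching overlap
--     # We look for the longest suffix of prev_tail that matches a prefix of curr_head
--     best_overlap_len = 0
--     for overlap_len in range(1, min(len(prev_tail), len(curr_head)) + 1):
--         # Check if last overlap_len words of prev match first overlap_len of curr
--         if prev_tail[-overlap_len:] == curr_head[:overlap_len]:
--             best_overlap_len = overlap_len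
--
--     if best_overlap_len > 0:
--         # Remove the overlapping words from the start of curr_text
--         return " ".join(curr_words[best_overlap_len:])
--
--     return curr_text
-- ===== SOURCE B (Python) =====
-- def deduplicate_overlap(prev_text: str, curr_text: str, n_words: int = 20) -> str:
--     """KMP-based boundary dedup: the longest suffix-of-prev-tail matching a
--     prefix-of-curr-head is read off as the last entry of the KMP prefix
--     function of curr_head + [sentinel] + prev_tail, computed in one linear
--     pass instead of comparing a slice pair per candidate length."""
--     curr_words = curr_text.split()
--     curr_head = curr_words[:n_words]
--     prev_tail = prev_text.split()[-n_words:]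
--     s = curr_head + [object()] + prev_tail   # sentinel equals no word
--     pi = [0] * len(s)
--     k = 0
--     for i in range(1, len(s)):
--         while k > 0 and s[i] != s[k]:
--             k = pi[k - 1]
--         if s[i] == s[k]:
--             k += 1
--         pi[i] = k
--     best = pi[-1]
--     return " ".join(curr_words[best:]) if best > 0 else curr_text
-- ===== Notes on version B (the rewrite author's own statement) =====
-- stated objective: alternative
-- what changed: B computes the longest suffix(prev_tail)/prefix(curr_head) word overlap as the last entry of a KMP prefix-function (failure array) over curr_head + [sentinel] + prev_tail in one linear pass over that array, instead of A's per-length slice-equality scan that compares a fresh suffix/prefix slice pair for every candidate overlap length.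
import Mathlib
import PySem

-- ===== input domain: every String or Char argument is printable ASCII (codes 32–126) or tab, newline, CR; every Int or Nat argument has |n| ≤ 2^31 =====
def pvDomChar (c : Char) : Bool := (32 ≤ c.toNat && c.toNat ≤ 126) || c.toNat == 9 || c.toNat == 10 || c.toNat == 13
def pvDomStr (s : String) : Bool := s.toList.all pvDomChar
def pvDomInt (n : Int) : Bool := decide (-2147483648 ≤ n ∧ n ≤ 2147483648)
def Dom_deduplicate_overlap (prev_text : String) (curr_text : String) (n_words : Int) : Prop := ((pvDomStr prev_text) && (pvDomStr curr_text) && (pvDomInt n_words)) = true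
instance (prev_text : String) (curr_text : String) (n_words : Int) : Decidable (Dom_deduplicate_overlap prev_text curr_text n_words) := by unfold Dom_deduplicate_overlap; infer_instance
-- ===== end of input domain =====

-- B replaces A's per-length slice comparisons with one KMP prefix-function pass
-- over curr_head ++ [sentinel] ++ prev_tail, whose last entry is the overlap.

-- ===== PORT A =====
def deduplicate_overlap (prev_text : String) (curr_text : String) (n_words : Int) : String :=
  if prev_text = "" ∨ curr_text = "" then curr_text
  else
    let prev_words := PySem.Str.split₀ prev_text
    let curr_words := PySem.Str.split₀ curr_text
    if prev_words = [] ∨ curr_words = [] then curr_text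
    else
      let prev_tail := if n_words ≤ (prev_words.length : Int) then PySem.List.slice prev_words (some (-n_words)) none else prev_words
      let curr_head := if n_words ≤ (curr_words.length : Int) then PySem.List.slice curr_words none (some n_words) else curr_words
      let best := (PySem.List.pyRange 1 ((min prev_tail.length curr_head.length : Nat) + 1) 1).foldl
        (fun best k => if PySem.List.slice prev_tail (some (-k)) none = PySem.List.slice curr_head none (some k) then k else best) 0
      if 0 < best then PySem.Str.join " " (PySem.List.slice curr_words (some best) none) else curr_text

-- ===== PORT B =====
-- Python's sentinel `object()` (equal to no word) is `none`; words are `some w`.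

-- `while k > 0 and s[i] != s[k]: k = pi[k-1]`; the fuel argument only makes the
-- loop total: fuel = the entering k suffices, because pi[j] ≤ j throughout (proved below)
def kmpFallback (s : List (Option String)) (pi : List Nat) (x : Option String) : Nat → Nat → Nat
  | 0, k => k
  | fuel + 1, k =>
      if 0 < k ∧ ¬ x = s.getD k none then kmpFallback s pi x fuel (pi.getD (k - 1) 0) else k

-- one iteration of `for i in range(1, len(s))`: state is (pi, k)
def kmpStep (s : List (Option String)) (st : List Nat × Nat) (i : Int) : List Nat × Nat :=
  let x := s.getD i.toNat none
  let k1 := kmpFallback s st.1 x st.2 st.2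
  let k2 := if x = s.getD k1 none then k1 + 1 else k1
  (st.1.set i.toNat k2, k2)

-- `pi = [0]*len(s); k = 0; for i in range(1, len(s)): … ; pi[i] = k`
def kmpPrefixFun (s : List (Option String)) : List Nat :=
  ((PySem.List.pyRange 1 (s.length : Int) 1).foldl (kmpStep s) (List.replicate s.length 0, 0)).1

def deduplicate_overlap_alt (prev_text : String) (curr_text : String) (n_words : Int) : String :=
  let curr_words := PySem.Str.split₀ curr_text
  let curr_head := PySem.List.slice curr_words none (some n_words)
  let prev_tail := PySem.List.slice (PySem.Str.split₀ prev_text) (some (-n_words)) none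
  let s := curr_head.map some ++ [none] ++ prev_tail.map some
  let pi := kmpPrefixFun s
  let best := PySem.List.pyGetD pi (-1) 0   -- pi[-1]; s always holds the sentinel, so pi is never empty
  if 0 < best then PySem.Str.join " " (PySem.List.slice curr_words (some (best : Int)) none) else curr_text

-- ===== PRECONDITION & SPEC =====
def Spec_deduplicate_overlap (prev_text : String) (curr_text : String) (n_words : Int) (out : String) : Prop := out = deduplicate_overlap_alt prev_text curr_text n_words
instance (prev_text : String) (curr_text : String) (n_words : Int) (out : String) : Decidable (Spec_deduplicate_overlap prev_text curr_text n_words out) := by unfold Spec_deduplicate_overlap; infer_instance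

-- ===== CLAIM (what is proved, stated in full; the proofs are below) =====
def Claim_equal_deduplicate_overlap : Prop := ∀ (prev_text : String) (curr_text : String) (n_words : Int), Dom_deduplicate_overlap prev_text curr_text n_words → Spec_deduplicate_overlap prev_text curr_text n_words (deduplicate_overlap prev_text curr_text n_words)

-- ===== LEMMAS AND PROOFS =====

-- `k` is a proper border of `t`: the length-k prefix equals the length-k suffix
def IsBrd (t : List (Option String)) (k : Nat) : Prop :=
  k < t.length ∧ t.take k = t.drop (t.length - k)

-- the longest proper border
def bord (t : List (Option String)) : Nat :=
  Nat.findGreatest (fun k => t.take k = t.drop (t.length - k)) (t.length - 1)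

theorem bord_lt_length (t : List (Option String)) (h : t ≠ []) : bord t < t.length := by
  have h1 := Nat.findGreatest_le (P := fun k => t.take k = t.drop (t.length - k)) (t.length - 1)
  have h2 : 0 < t.length := List.length_pos_of_ne_nil h
  unfold bord; omega

theorem bord_isBrd (t : List (Option String)) (h : t ≠ []) : IsBrd t (bord t) := by
  refine ⟨bord_lt_length t h, ?_⟩
  by_cases h0 : bord t = 0
  · rw [h0]; simp
  · exact Nat.findGreatest_of_ne_zero rfl h0

theorem isBrd_le_bord (t : List (Option String)) (k : Nat) (hk : IsBrd t k) : k ≤ bord t := by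
  obtain ⟨h1, h2⟩ := hk
  exact Nat.le_findGreatest (by omega) h2

-- a shorter border below a border is a border of the border-prefix
theorem isBrd_take (t : List (Option String)) (c j : Nat)
    (hc : IsBrd t c) (hj : IsBrd t j) (hlt : j < c) : IsBrd (t.take c) j := by
  obtain ⟨hc1, hc2⟩ := hc
  obtain ⟨hj1, hj2⟩ := hj
  have hlen : (t.take c).length = c := by rw [List.length_take]; omega
  refine ⟨by omega, ?_⟩
  rw [hlen, List.take_take, show min j c = j from by omega, hc2, List.drop_drop, hj2]
  congr 1
  omega

-- a border of a border-prefix is a border of the whole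
theorem isBrd_of_take (t : List (Option String)) (c j : Nat)
    (hc : IsBrd t c) (hj : IsBrd (t.take c) j) : IsBrd t j := by
  obtain ⟨hc1, hc2⟩ := hc
  obtain ⟨hj1, hj2⟩ := hj
  have hlen : (t.take c).length = c := by rw [List.length_take]; omega
  rw [hlen] at hj1 hj2
  refine ⟨by omega, ?_⟩
  have h1 : t.take j = (t.take c).take j := by
    rw [List.take_take]; congr 1; omega
  rw [h1, hj2, hc2, List.drop_drop]
  congr 1
  omega

-- border extension by one element
theorem isBrd_append_succ (u : List (Option String)) (x : Option String) (k : Nat) :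
    IsBrd (u ++ [x]) (k + 1) ↔ IsBrd u k ∧ u[k]? = some x := by
  constructor
  · rintro ⟨h1, h2⟩
    simp only [List.length_append, List.length_singleton] at h1
    have hk : k < u.length := by omega
    rw [List.take_append_of_le_length (by omega),
        show (u ++ [x]).length - (k + 1) = u.length - k from by
          simp only [List.length_append, List.length_singleton]; omega,
        List.drop_append_of_le_length (by omega),
        List.take_succ, List.getElem?_eq_getElem hk] at h2
    obtain ⟨e1, e2⟩ := List.append_inj h2 (by rw [List.length_take, List.length_drop]; omega)
    refine ⟨⟨hk, e1⟩, ?_⟩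
    rw [List.getElem?_eq_getElem hk]
    simpa using e2
  · rintro ⟨⟨hk, hb⟩, hx⟩
    rw [List.getElem?_eq_getElem hk] at hx
    refine ⟨by simp; omega, ?_⟩
    rw [List.take_append_of_le_length (by omega),
        show (u ++ [x]).length - (k + 1) = u.length - k from by
          simp only [List.length_append, List.length_singleton]; omega,
        List.drop_append_of_le_length (by omega),
        List.take_succ, List.getElem?_eq_getElem hk, hb]
    simp at hx
    simp [hx]

-- the pi entries computed so far are the bord values of the prefixes
def PiOK (s : List (Option String)) (pi : List Nat) (i : Nat) : Prop :=
  ∀ j, j < i → pi.getD j 0 = bord (s.take (j + 1))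

-- the while-loop walks the border chain and finds the longest border of
-- s.take i that is followed by x (or 0)
theorem fallback_spec (s : List (Option String)) (pi : List Nat) (x : Option String)
    (i : Nat) (hi2 : i ≤ s.length) (hpi : PiOK s pi i) :
    ∀ fuel c, c ≤ fuel → IsBrd (s.take i) c →
      IsBrd (s.take i) (kmpFallback s pi x fuel c) ∧
      (x = s.getD (kmpFallback s pi x fuel c) none ∨ kmpFallback s pi x fuel c = 0) ∧
      (∀ j, IsBrd (s.take i) j → j ≤ c → x = s.getD j none → j ≤ kmpFallback s pi x fuel c) := by
  intro fuel
  induction fuel with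
  | zero =>
      intro c hcf hc
      have hc0 : c = 0 := by omega
      subst hc0
      refine ⟨hc, Or.inr rfl, fun j _ hj _ => by simpa [kmpFallback] using hj⟩
  | succ fuel ih =>
      intro c hcf hc
      have hti : (s.take i).length = i := by rw [List.length_take]; omega
      by_cases hcond : 0 < c ∧ ¬ x = s.getD c none
      · have hred : kmpFallback s pi x (fuel + 1) c = kmpFallback s pi x fuel (pi.getD (c - 1) 0) := by
          simp only [kmpFallback]; rw [if_pos hcond]
        have hci : c < i := by have := hc.1; omega
        have hpc : pi.getD (c - 1) 0 = bord (s.take c) := by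
          have h := hpi (c - 1) (by omega)
          rwa [show c - 1 + 1 = c from by omega] at h
        have htc : (s.take i).take c = s.take c := by
          rw [List.take_take]; congr 1; omega
        have hcne : s.take c ≠ [] := by
          apply List.ne_nil_of_length_pos
          rw [List.length_take]; omega
        have hbc : IsBrd (s.take c) (bord (s.take c)) := bord_isBrd _ hcne
        have hbc' : IsBrd (s.take i) (bord (s.take c)) := by
          refine isBrd_of_take _ c _ hc ?_
          rw [htc]; exact hbc
        have hblt : bord (s.take c) < c := by
          have := bord_lt_length _ hcne
          rw [List.length_take] at this; omega
        obtain ⟨h1, h2, h3⟩ := ih (pi.getD (c - 1) 0) (by rw [hpc]; omega) (by rw [hpc]; exact hbc')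
        rw [hred]
        refine ⟨h1, h2, ?_⟩
        intro j hj hjc hxj
        by_cases hjce : j = c
        · subst hjce; exact absurd hxj hcond.2
        · have hjlt : j < c := by omega
          have hjtk : IsBrd ((s.take i).take c) j := isBrd_take _ c j hc hj hjlt
          rw [htc] at hjtk
          have hjb : j ≤ bord (s.take c) := isBrd_le_bord _ j hjtk
          exact h3 j hj (by rw [hpc]; omega) hxj
      · have hred : kmpFallback s pi x (fuel + 1) c = c := by
          simp only [kmpFallback]; rw [if_neg hcond]
        rw [hred]
        refine ⟨hc, ?_, fun j _ hj _ => hj⟩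
        by_cases hc0 : c = 0
        · exact Or.inr hc0
        · left
          rcases not_and_or.mp hcond with h | h
          · omega
          · exact not_not.mp h

-- one step of the loop computes the next bord value
theorem bord_succ_of_fallback (s : List (Option String)) (n r : Nat)
    (hn : 1 ≤ n) (hlen : n < s.length)
    (hr : IsBrd (s.take n) r)
    (hmax : ∀ j, IsBrd (s.take n) j → s.getD n none = s.getD j none → j ≤ r)
    (hstop : s.getD n none = s.getD r none ∨ r = 0) :
    (if s.getD n none = s.getD r none then r + 1 else r) = bord (s.take (n + 1)) := by
  have ht : (s.take n).length = n := by rw [List.length_take]; omega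
  have htake : s.take (n + 1) = s.take n ++ [s[n]] := by
    rw [List.take_succ, List.getElem?_eq_getElem hlen]; rfl
  have hx : s.getD n none = s[n] := by
    simp [List.getD, List.getElem?_eq_getElem hlen]
  have hne1 : s.take (n + 1) ≠ [] := by
    apply List.ne_nil_of_length_pos
    rw [List.length_take]; omega
  have hrn : r < n := by have := hr.1; omega
  split_ifs with hif
  · apply Nat.le_antisymm
    · apply isBrd_le_bord
      rw [htake, isBrd_append_succ]
      refine ⟨hr, ?_⟩
      rw [List.getElem?_take_of_lt hrn, List.getElem?_eq_getElem (by omega)]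
      have : s.getD r none = s[r] := by
        simp [List.getD, List.getElem?_eq_getElem (show r < s.length from by omega)]
      rw [← hx, ← this, hif]
    · have hb := bord_isBrd (s.take (n + 1)) hne1
      cases hbv : bord (s.take (n + 1)) with
      | zero => omega
      | succ j =>
          rw [hbv, htake, isBrd_append_succ] at hb
          obtain ⟨hbj, hbg⟩ := hb
          have hjn : j < n := by have := hbj.1; omega
          have hxj : s.getD n none = s.getD j none := by
            rw [List.getElem?_take_of_lt hjn, List.getElem?_eq_getElem (by omega)] at hbg
            have : s.getD j none = s[j] := by
              simp [List.getD, List.getElem?_eq_getElem (show j < s.length from by omega)]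
            rw [hx, this]
            exact (Option.some.inj hbg).symm
          have := hmax j hbj hxj
          omega
  · have hr0 : r = 0 := by
      rcases hstop with h | h
      · exact absurd h hif
      · exact h
    subst hr0
    symm
    cases hbv : bord (s.take (n + 1)) with
    | zero => rfl
    | succ j =>
        exfalso
        have hb := bord_isBrd (s.take (n + 1)) hne1
        rw [hbv, htake, isBrd_append_succ] at hb
        obtain ⟨hbj, hbg⟩ := hb
        have hjn : j < n := by have := hbj.1; omega
        have hxj : s.getD n none = s.getD j none := by
          rw [List.getElem?_take_of_lt hjn, List.getElem?_eq_getElem (by omega)] at hbg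
          have : s.getD j none = s[j] := by
            simp [List.getD, List.getElem?_eq_getElem (show j < s.length from by omega)]
          rw [hx, this]
          exact (Option.some.inj hbg).symm
        have hj0 : j ≤ 0 := hmax j hbj hxj
        have hj0' : j = 0 := by omega
        subst hj0'
        exact hif hxj

theorem getD_set_self_nat (l : List Nat) (n v : Nat) (h : n < l.length) :
    (l.set n v).getD n 0 = v := by
  simp [List.getD, List.getElem?_set_eq_of_lt v h]

theorem getD_set_ne_nat (l : List Nat) (n j v : Nat) (h : j ≠ n) :
    (l.set n v).getD j 0 = l.getD j 0 := by
  simp [List.getD, List.getElem?_set_ne (show n ≠ j from fun e => h e.symm)]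

-- the loop invariant: lengths, the PiOK table, and k = bord of the processed prefix
theorem kmpLoop_spec (s : List (Option String)) (n : Nat) (hn : 1 ≤ n) (hlen : n ≤ s.length) :
    ((PySem.List.pyRange 1 (n : Int) 1).foldl (kmpStep s) (List.replicate s.length 0, 0)).1.length = s.length ∧
    PiOK s ((PySem.List.pyRange 1 (n : Int) 1).foldl (kmpStep s) (List.replicate s.length 0, 0)).1 n ∧
    ((PySem.List.pyRange 1 (n : Int) 1).foldl (kmpStep s) (List.replicate s.length 0, 0)).2 = bord (s.take n) := by
  induction n with
  | zero => omega
  | succ n ih =>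
      by_cases hn1 : n = 0
      · subst hn1
        rw [show ((1 : Nat) : Int) = 1 from rfl, PySem.List.pyRange_one_eq_nil (le_refl 1)]
        simp only [List.foldl_nil]
        have ht1 : (s.take 1).length = 1 := by rw [List.length_take]; omega
        have hb1 : bord (s.take 1) = 0 := by
          unfold bord
          rw [ht1]
          exact Nat.findGreatest_zero
        refine ⟨by simp, ?_, by simp [hb1]⟩
        intro j hj
        have hj0 : j = 0 := by omega
        subst hj0
        simp [List.getD, show 0 < s.length from by omega, hb1]
      · have hn' : 1 ≤ n := by omega
        obtain ⟨ih1, ih2, ih3⟩ := ih hn' (by omega)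
        rw [show ((n + 1 : Nat) : Int) = ((n : Nat) : Int) + 1 from by push_cast; ring,
            PySem.List.pyRange_one_succ_right (by exact_mod_cast hn'), List.foldl_append,
            List.foldl_cons, List.foldl_nil]
        set st := (PySem.List.pyRange 1 (n : Int) 1).foldl (kmpStep s) (List.replicate s.length 0, 0) with hst
        simp only [kmpStep, Int.toNat_natCast]
        set x := s.getD n none with hxdef
        have hfb := fallback_spec s st.1 x n (by omega) ih2 st.2 st.2 (le_refl _)
          (by rw [ih3]; exact bord_isBrd _ (by apply List.ne_nil_of_length_pos; rw [List.length_take]; omega))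
        obtain ⟨hr1, hr2, hr3⟩ := hfb
        set r := kmpFallback s st.1 x st.2 st.2 with hrdef
        have hk2 : (if x = s.getD r none then r + 1 else r) = bord (s.take (n + 1)) := by
          apply bord_succ_of_fallback s n r hn' (by omega) hr1
          · intro j hj hxj
            exact hr3 j hj (by rw [ih3]; exact isBrd_le_bord _ j hj) hxj
          · exact hr2
        refine ⟨by rw [List.length_set]; exact ih1, ?_, hk2⟩
        intro j hj
        by_cases hje : j = n
        · subst hje
          rw [getD_set_self_nat _ _ _ (by omega)]
          exact hk2
        · rw [getD_set_ne_nat _ _ _ _ hje]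
          exact ih2 j (by omega)

-- pi[-1] is the longest proper border of s
theorem kmpPrefixFun_last (s : List (Option String)) (hs : 1 ≤ s.length) :
    PySem.List.pyGetD (kmpPrefixFun s) (-1) 0 = bord s := by
  obtain ⟨hl, hpi, -⟩ := kmpLoop_spec s s.length hs (le_refl _)
  unfold kmpPrefixFun
  set pi := ((PySem.List.pyRange 1 (s.length : Int) 1).foldl (kmpStep s) (List.replicate s.length 0, 0)).1 with hpidef
  have hne : pi ≠ [] := by apply List.ne_nil_of_length_pos; omega
  rw [PySem.List.pyGetD_neg_one _ 0 hne]
  have h := hpi (s.length - 1) (by omega)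
  rw [show s.length - 1 + 1 = s.length from by omega, List.take_length] at h
  rw [← h]
  rw [List.getLast_eq_getElem]
  simp [List.getD, List.getElem?_eq_getElem (show s.length - 1 < pi.length from by omega), hl]

-- the only `none` in head ++ [sentinel] ++ tail is the sentinel
theorem sentinel_unique (hd tl : List String) (j : Nat)
    (h : (hd.map some ++ [none] ++ tl.map some)[j]? = some (none : Option String)) :
    j = hd.length := by
  by_contra hne
  rcases Nat.lt_or_ge j hd.length with hlt | hge
  · rw [List.append_assoc, List.getElem?_append_left (by simpa using hlt), List.getElem?_map] at h
    cases hj : hd[j]? <;> simp [hj] at h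
  · have hgt : hd.length < j := by omega
    rw [List.append_assoc, List.getElem?_append_right (by simpa using hge)] at h
    rw [List.length_map, List.singleton_append] at h
    cases hm : j - hd.length with
    | zero => omega
    | succ m' =>
        rw [hm, List.getElem?_cons_succ, List.getElem?_map] at h
        cases hj : tl[m']? <;> simp [hj] at h

-- a border of the sentinel string never crosses the sentinel
theorem isBrd_sentinel_le (hd tl : List String) (k : Nat)
    (h : IsBrd (hd.map some ++ [none] ++ tl.map some) k) :
    k ≤ hd.length ∧ k ≤ tl.length := by
  obtain ⟨h1, h2⟩ := h
  set s := hd.map some ++ [none] ++ tl.map some with hsdef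
  have hL : s.length = hd.length + 1 + tl.length := by
    simp only [hsdef, List.length_append, List.length_map, List.length_singleton]
  have hsent : s[hd.length]? = some (none : Option String) := by
    rw [hsdef, List.append_assoc, List.getElem?_append_right (by simp)]
    simp
  constructor
  · by_contra ha
    push_neg at ha
    have c1 : (s.take k)[hd.length]? = s[hd.length]? := List.getElem?_take_of_lt ha
    have c2 : (s.drop (s.length - k))[hd.length]? = s[s.length - k + hd.length]? := by
      rw [List.getElem?_drop]
    have e : s[s.length - k + hd.length]? = some (none : Option String) := by
      rw [← c2, ← h2, c1, hsent]
    have := sentinel_unique hd tl _ e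
    omega
  · by_contra hb
    push_neg at hb
    have hd1 : s.length - k ≤ hd.length := by omega
    have hi0 : hd.length - (s.length - k) < k := by omega
    have c1 : (s.take k)[hd.length - (s.length - k)]? = s[hd.length - (s.length - k)]? :=
      List.getElem?_take_of_lt hi0
    have c2 : (s.drop (s.length - k))[hd.length - (s.length - k)]? = s[s.length - k + (hd.length - (s.length - k))]? := by
      rw [List.getElem?_drop]
    have e0 : s.length - k + (hd.length - (s.length - k)) = hd.length := by omega
    have e : s[hd.length - (s.length - k)]? = some (none : Option String) := by
      rw [← c1, h2, c2, e0, hsent]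
    have := sentinel_unique hd tl _ e
    omega

-- below both bounds, being a border is exactly the suffix/prefix word match
theorem isBrd_sentinel_iff (hd tl : List String) (k : Nat)
    (h1 : k ≤ hd.length) (h2 : k ≤ tl.length) :
    IsBrd (hd.map some ++ [none] ++ tl.map some) k ↔ tl.drop (tl.length - k) = hd.take k := by
  set s := hd.map some ++ [none] ++ tl.map some with hsdef
  have hL : s.length = hd.length + 1 + tl.length := by
    simp only [hsdef, List.length_append, List.length_map, List.length_singleton]
  have e1 : s.take k = (hd.take k).map some := by
    rw [hsdef, List.append_assoc, List.take_append_of_le_length (by simpa using h1), List.map_take]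
  have e2 : s.drop (s.length - k) = (tl.drop (tl.length - k)).map some := by
    have hsplit : s.length - k = (hd.map some ++ [none]).length + (tl.length - k) := by
      simp [hsdef]; omega
    rw [hsplit, hsdef, List.drop_append, List.drop_eq_nil_of_le (by omega), List.nil_append,
        Nat.add_sub_cancel_left, List.map_drop]
  unfold IsBrd
  rw [e1, e2]
  have hinj : ((hd.take k).map some = (tl.drop (tl.length - k)).map some) ↔
      (hd.take k = tl.drop (tl.length - k)) :=
    ⟨fun h => List.map_injective_iff.mpr (Option.some_injective _) h, fun h => by rw [h]⟩
  rw [hinj]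
  constructor
  · rintro ⟨-, h⟩; exact h.symm
  · intro h; exact ⟨by omega, h.symm⟩

-- the longest border of head ++ [sentinel] ++ tail is the longest word overlap
theorem bord_sentinel (hd tl : List String) :
    bord (hd.map some ++ [none] ++ tl.map some)
      = Nat.findGreatest (fun k => tl.drop (tl.length - k) = hd.take k) (min tl.length hd.length) := by
  set s := hd.map some ++ [none] ++ tl.map some with hsdef
  have hne : s ≠ [] := by
    apply List.ne_nil_of_length_pos
    simp [hsdef]
  apply Nat.le_antisymm
  · have hb := bord_isBrd s hne
    have hle := isBrd_sentinel_le hd tl _ hb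
    have hq := (isBrd_sentinel_iff hd tl _ hle.1 hle.2).mp hb
    exact Nat.le_findGreatest (by omega) hq
  · have hM := Nat.findGreatest_le (P := fun k => tl.drop (tl.length - k) = hd.take k)
      (min tl.length hd.length)
    have hqM : tl.drop (tl.length - Nat.findGreatest (fun k => tl.drop (tl.length - k) = hd.take k) (min tl.length hd.length))
        = hd.take (Nat.findGreatest (fun k => tl.drop (tl.length - k) = hd.take k) (min tl.length hd.length)) := by
      by_cases h0 : Nat.findGreatest (fun k => tl.drop (tl.length - k) = hd.take k) (min tl.length hd.length) = 0
      · rw [h0]; simp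
      · exact Nat.findGreatest_of_ne_zero rfl h0
    exact isBrd_le_bord s _ ((isBrd_sentinel_iff hd tl _ (by omega) (by omega)).mpr hqM)

-- A's ascending keep-the-last-match fold computes Nat.findGreatest of the word match
theorem a_foldl_eq (pt ch : List String) (m : Nat) :
    (PySem.List.pyRange 1 ((m : Int) + 1) 1).foldl
      (fun best k => if PySem.List.slice pt (some (-k)) none = PySem.List.slice ch none (some k) then k else best) 0
      = ((Nat.findGreatest (fun k => pt.drop (pt.length - k) = ch.take k) m : Nat) : Int) := by
  induction m with
  | zero =>
      rw [show ((0 : Nat) : Int) + 1 = 1 from by norm_num, PySem.List.pyRange_one_eq_nil (le_refl 1)]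
      simp
  | succ m ih =>
      rw [show ((m + 1 : Nat) : Int) + 1 = (((m : Nat) : Int) + 1) + 1 from by push_cast; ring,
          PySem.List.pyRange_one_succ_right (by push_cast; omega), List.foldl_append, ih,
          List.foldl_cons, List.foldl_nil]
      have hslice1 : PySem.List.slice pt (some (-((m : Int) + 1))) none = pt.drop (pt.length - (m + 1)) := by
        rw [show -((m : Int) + 1) = -(((m + 1 : Nat)) : Int) from by push_cast; ring,
            PySem.List.slice_from_neg_natCast pt (m + 1) (by omega)]
      have hslice2 : PySem.List.slice ch none (some ((m : Int) + 1)) = ch.take (m + 1) := by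
        rw [show ((m : Int) + 1) = (((m + 1 : Nat)) : Int) from by push_cast; ring,
            PySem.List.slice_to_natCast]
      rw [hslice1, hslice2, Nat.findGreatest_succ]
      by_cases hp : pt.drop (pt.length - (m + 1)) = ch.take (m + 1)
      · rw [if_pos hp, if_pos hp]; push_cast; ring
      · rw [if_neg hp, if_neg hp]

-- A's guard 'len(prev_words) >= n_words' is redundant: xs[-n:] clamps to xs itself when n > len(xs)
theorem slice_from_neg_redundant {α : Type} (xs : List α) (n : Int) :
    (if n ≤ (xs.length : Int) then PySem.List.slice xs (some (-n)) none else xs)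
      = PySem.List.slice xs (some (-n)) none := by
  split_ifs with h
  · rfl
  · push Not at h
    have h0 : 0 < n := lt_of_le_of_lt (by exact_mod_cast Nat.zero_le xs.length) h
    have hn : n = ((n.toNat : Nat) : Int) := by omega
    rw [hn, PySem.List.slice_from_neg_natCast xs n.toNat (by omega)]
    have : xs.length - n.toNat = 0 := by omega
    rw [this, List.drop_zero]

-- likewise 'len(curr_words) >= n_words' for xs[:n]
theorem slice_to_redundant {α : Type} (xs : List α) (n : Int) :
    (if n ≤ (xs.length : Int) then PySem.List.slice xs none (some n) else xs)
      = PySem.List.slice xs none (some n) := by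
  split_ifs with h
  · rfl
  · push Not at h
    have h0 : 0 ≤ n := le_of_lt (lt_of_le_of_lt (by exact_mod_cast Nat.zero_le xs.length) h)
    rw [PySem.List.slice_to xs h0]
    exact (List.take_of_length_le (by omega)).symm

theorem split0_empty : PySem.Str.split₀ "" = [] := by decide

theorem slice_nil {α : Type} (a? b? : Option Int) : PySem.List.slice ([] : List α) a? b? = [] := by
  unfold PySem.List.slice
  cases a? <;> cases b? <;> simp

-- the common value of both programs
def canon (prev_text : String) (curr_text : String) (n_words : Int) : String :=
  let curr_words := PySem.Str.split₀ curr_text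
  let curr_head := PySem.List.slice curr_words none (some n_words)
  let prev_tail := PySem.List.slice (PySem.Str.split₀ prev_text) (some (-n_words)) none
  let M := Nat.findGreatest (fun k => prev_tail.drop (prev_tail.length - k) = curr_head.take k)
    (min prev_tail.length curr_head.length)
  if 0 < M then PySem.Str.join " " (PySem.List.slice curr_words (some (M : Int)) none) else curr_text

theorem alt_eq_canon (prev_text curr_text : String) (n_words : Int) :
    deduplicate_overlap_alt prev_text curr_text n_words = canon prev_text curr_text n_words := by
  simp only [deduplicate_overlap_alt, canon]
  rw [kmpPrefixFun_last _ (by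
    simp only [List.length_append, List.length_map, List.length_singleton]; omega), bord_sentinel]

theorem a_eq_canon (prev_text curr_text : String) (n_words : Int) :
    deduplicate_overlap prev_text curr_text n_words = canon prev_text curr_text n_words := by
  simp only [deduplicate_overlap, canon]
  by_cases hg1 : prev_text = "" ∨ curr_text = ""
  · rw [if_pos hg1]
    rcases hg1 with h | h
    · rw [h, split0_empty, slice_nil]
      simp
    · rw [h, split0_empty, slice_nil]
      simp
  · rw [if_neg hg1]
    by_cases hg2 : PySem.Str.split₀ prev_text = [] ∨ PySem.Str.split₀ curr_text = []
    · rw [if_pos hg2]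
      rcases hg2 with h | h
      · rw [h, slice_nil]
        simp
      · rw [h, slice_nil]
        simp
    · rw [if_neg hg2, slice_from_neg_redundant, slice_to_redundant, a_foldl_eq]
      by_cases hM : 0 < Nat.findGreatest
          (fun k => (PySem.List.slice (PySem.Str.split₀ prev_text) (some (-n_words)) none).drop
              ((PySem.List.slice (PySem.Str.split₀ prev_text) (some (-n_words)) none).length - k)
            = (PySem.List.slice (PySem.Str.split₀ curr_text) none (some n_words)).take k)
          (min (PySem.List.slice (PySem.Str.split₀ prev_text) (some (-n_words)) none).length
            (PySem.List.slice (PySem.Str.split₀ curr_text) none (some n_words)).length)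
      · rw [if_pos (by exact_mod_cast hM), if_pos hM]
      · rw [if_neg (by exact_mod_cast hM), if_neg hM]

-- ===== VERDICT (by name: the statement is the Claim_ definition above) =====
theorem deduplicate_overlap_spec : Claim_equal_deduplicate_overlap := by
  intro prev_text curr_text n_words _
  unfold Spec_deduplicate_overlap
  rw [a_eq_canon, alt_eq_canon]
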